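-- pv_equiv track=rewrite | github.com/pushpa-info-14/python-programming | LeetCode/3500-3750/Q3578 Count Partitions With Max-Min Difference at Most K.py | countPartitions2
-- ===== SOURCE A (Python) =====
-- from collections import deque
-- from typing import List
--
-- def countPartitions2(nums: List[int], k: int) -> int:
--     n = len(nums)
--     mod = 10 ** 9 + 7
--     dp = [0] * (n + 1)
--     prefix = [0] * (n + 1)
--     min_q = deque()
--     max_q = deque()
--     dp[0] = 1
--     prefix[0] = 1
--     l = 0
--     for r in range(n):
--         # maintain the maximum value queue
--         while max_q and nums[max_q[-1]] <= nums[r]: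
--             max_q.pop()
--         max_q.append(r)
--
--         # maintain the minimum value queue
--         while min_q and nums[min_q[-1]] >= nums[r]:
--             min_q.pop()
--         min_q.append(r)
--
--         # adjust window
--         while max_q and min_q and nums[max_q[0]] - nums[min_q[0]] > k:
--             if max_q[0] == l:
--                 max_q.popleft()
--             if min_q[0] == l:
--                 min_q.popleft()
--             l += 1
--
--         if l > 0:
--             dp[r + 1] = (prefix[r] - prefix[l - 1] + mod) % mod
--         else:
--             dp[r + 1] = prefix[r] % mod
--         prefix[r + 1] = (prefix[r] + dp[r + 1]) % mod
--
--     return dp[n]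
-- ===== SOURCE B (Python) =====
-- from typing import List
--
-- def countPartitions2(nums: List[int], k: int) -> int:
--     mod = 10 ** 9 + 7
--     dp = [1]
--     for r in range(len(nums)):
--         mx = nums[r]
--         mn = nums[r]
--         total = 0
--         for l in range(r, -1, -1):
--             mx = max(mx, nums[l])
--             mn = min(mn, nums[l])
--             if mx - mn <= k:
--                 total += dp[l]
--         dp.append(total % mod)
--     return dp[len(nums)]
-- ===== Notes on version B (the rewrite author's own statement) =====
-- stated objective: simpler
-- what changed: Replaced the monotonic min/max deques, two-pointer window and prefix-sum array by a direct quadratic recurrence: for each right end r a single backward scan keeps running max/min and directly sums dp[l] over the valid starts, so all queue and prefix bookkeeping disappears.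
import Mathlib
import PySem

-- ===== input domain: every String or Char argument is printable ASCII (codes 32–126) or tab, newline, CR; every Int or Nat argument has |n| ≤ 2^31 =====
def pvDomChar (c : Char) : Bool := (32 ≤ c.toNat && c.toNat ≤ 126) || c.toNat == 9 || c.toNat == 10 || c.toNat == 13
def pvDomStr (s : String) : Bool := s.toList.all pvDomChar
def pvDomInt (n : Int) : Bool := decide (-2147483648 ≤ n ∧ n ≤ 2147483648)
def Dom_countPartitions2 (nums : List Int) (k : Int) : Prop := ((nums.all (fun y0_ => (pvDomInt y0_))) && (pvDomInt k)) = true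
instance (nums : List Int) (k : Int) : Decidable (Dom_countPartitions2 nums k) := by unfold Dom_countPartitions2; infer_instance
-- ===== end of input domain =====

-- B replaces A's monotonic min/max deques + two-pointer window + prefix array by a plain
-- quadratic backward scan per right end (same return value; no speed claim).

-- ===== PORT A =====
-- Deques are represented back-to-front: list head = Python's q[-1], getLast? = Python's q[0].
-- nums.getD i 0 ports nums[i]: every index read is in range, so getD is exact here.
-- The adjust `while` loop is ported with fuel n+1, which exceeds the iterations Python performs.
def pvAdjust (nums : List Int) (k : Int) : Nat → List Nat → List Nat → Nat → List Nat × List Nat × Nat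
  | 0, maxq, minq, l => (maxq, minq, l)
  | fuel+1, maxq, minq, l =>
    match maxq.getLast?, minq.getLast? with
    | some mx, some mn =>
      if nums.getD mx 0 - nums.getD mn 0 > k then
        pvAdjust nums k fuel (if mx = l then maxq.dropLast else maxq)
          (if mn = l then minq.dropLast else minq) (l+1)
      else (maxq, minq, l)
    | _, _ => (maxq, minq, l)

-- one iteration of A's `for r in range(n)` body; state = (dp, prefix, min_q, max_q, l)
def pvStepA (nums : List Int) (k : Int) (n : Nat)
    (st : List Int × List Int × List Nat × List Nat × Nat) (r : Nat) :
    List Int × List Int × List Nat × List Nat × Nat :=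
  let dp := st.1
  let px := st.2.1
  let minq := st.2.2.1
  let maxq := st.2.2.2.1
  let l := st.2.2.2.2
  let maxq := r :: maxq.dropWhile (fun i => decide (nums.getD i 0 ≤ nums.getD r 0))
  let minq := r :: minq.dropWhile (fun i => decide (nums.getD i 0 ≥ nums.getD r 0))
  let res := pvAdjust nums k (n+1) maxq minq l
  let maxq := res.1
  let minq := res.2.1
  let l := res.2.2
  let m : Int := 10^9+7
  let dpv := if l > 0 then PySem.Int.mod (px.getD r 0 - px.getD (l-1) 0 + m) m
             else PySem.Int.mod (px.getD r 0) m
  (dp.set (r+1) dpv, px.set (r+1) (PySem.Int.mod (px.getD r 0 + dpv) m), minq, maxq, l)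

def countPartitions2 (nums : List Int) (k : Int) : Int :=
  let n := nums.length
  let st := List.foldl (pvStepA nums k n)
    ((List.replicate (n+1) (0:Int)).set 0 1, (List.replicate (n+1) (0:Int)).set 0 1,
      ([] : List Nat), ([] : List Nat), 0) (List.range n)
  st.1.getD n 0

-- ===== PORT B =====
-- Source B's inner `for l in range(r, -1, -1)` loop: argument `l+1` processes index l next
def pvInnerGo (nums : List Int) (k : Int) (dp : List Int) : Nat → Int → Int → Int → Int
  | 0, _, _, total => total
  | l+1, mx, mn, total =>
    let x := nums.getD l 0
    let mx := max mx x
    let mn := min mn x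
    pvInnerGo nums k dp l mx mn (if mx - mn ≤ k then total + dp.getD l 0 else total)

-- dp after the first r iterations of Source B's outer loop
def pvBuild (nums : List Int) (k : Int) : Nat → List Int
  | 0 => [1]
  | r+1 =>
    let dp := pvBuild nums k r
    dp ++ [PySem.Int.mod (pvInnerGo nums k dp (r+1) (nums.getD r 0) (nums.getD r 0) 0) (10^9+7)]

def countPartitions2_alt (nums : List Int) (k : Int) : Int :=
  (pvBuild nums k nums.length).getD nums.length 0

-- ===== PRECONDITION & SPEC =====
def Spec_countPartitions2 (nums : List Int) (k : Int) (out : Int) : Prop := out = countPartitions2_alt nums k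
instance (nums : List Int) (k : Int) (out : Int) : Decidable (Spec_countPartitions2 nums k out) := by unfold Spec_countPartitions2; infer_instance

-- ===== CLAIM (what is proved, stated in full; the proofs are below) =====
def Claim_equal_countPartitions2 : Prop := ∀ (nums : List Int) (k : Int), Dom_countPartitions2 nums k → Spec_countPartitions2 nums k (countPartitions2 nums k)

-- ===== LEMMAS AND PROOFS =====

-- value of element i (indices are always in range where this is used)
def pvG (nums : List Int) (i : Nat) : Int := nums.getD i 0

-- window [l, c) has max-min ≤ k, stated pairwise
def pvValid (nums : List Int) (k : Int) (l c : Nat) : Prop :=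
  ∀ i j, l ≤ i → i < c → l ≤ j → j < c → pvG nums i - pvG nums j ≤ k

-- generic monotonic-queue machinery over a valuation f (max queue: f = pvG; min queue: f = -pvG)
def pvKeep (f : Nat → Int) (c i : Nat) : Bool :=
  (List.range' (i+1) (c - (i+1))).all (fun j => decide (f j < f i))

def pvQ (f : Nat → Int) (l c : Nat) : List Nat :=
  ((List.range' l (c - l)).filter (pvKeep f c)).reverse

-- D r = Source B's dp[r], S r = A's prefix[r]
def pvD (nums : List Int) (k : Int) (r : Nat) : Int := (pvBuild nums k r).getD r 0

def pvS (nums : List Int) (k : Int) : Nat → Int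
  | 0 => 1
  | i+1 => PySem.Int.mod (pvS nums k i + pvD nums k (i+1)) (10^9+7)

-- running max/min of nums over [l, c) (equals pvG l when c ≤ l)
def pvWM (nums : List Int) (l c : Nat) : Int :=
  ((List.range' (l+1) (c - (l+1))).map (pvG nums)).foldl max (pvG nums l)
def pvWm (nums : List Int) (l c : Nat) : Int :=
  ((List.range' (l+1) (c - (l+1))).map (pvG nums)).foldl min (pvG nums l)


-- ---- generic monotonic-queue lemmas (f = pvG nums for max_q, f = -pvG nums for min_q) ----

lemma pvKeep_iff (f : Nat → Int) (c i : Nat) :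
    pvKeep f c i = true ↔ ∀ j, i < j → j < c → f j < f i := by
  simp only [pvKeep, List.all_eq_true, List.mem_range'_1, decide_eq_true_eq]
  constructor
  · intro h j h1 h2; exact h j ⟨h1, by omega⟩
  · rintro h j ⟨h1, h2⟩; exact h j h1 (by omega)

lemma pvKeep_self (f : Nat → Int) (c : Nat) (h : c ≤ 1 + 0 + c) : pvKeep f (c+1) c = true := by
  rw [pvKeep_iff]; intro j h1 h2; omega

lemma pvFilter_pairwise (f : Nat → Int) (l c : Nat) :
    ((List.range' l (c - l)).filter (pvKeep f c)).Pairwise (fun a b => f b < f a) := by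
  have hr : (List.range' l (c - l)).Pairwise (· < ·) := by
    rw [List.range'_eq_map_range]
    exact List.pairwise_lt_range.map _ (by omega)
  have hf := hr.filter (pvKeep f c)
  apply List.Pairwise.imp_of_mem ?_ hf
  intro a b ha hb hab
  have hka := (List.mem_filter.mp ha).2
  have hbr := (List.mem_filter.mp hb).1
  have hbc : b < c := by
    have := List.mem_range'_1.mp hbr; omega
  exact (pvKeep_iff f c a).mp hka b hab hbc

lemma pvDropWhile_eq_filter (f : Nat → Int) (v : Int) :
    ∀ xs : List Nat, xs.Pairwise (fun a b => f a < f b) →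
      xs.dropWhile (fun i => decide (f i ≤ v)) = xs.filter (fun i => decide (v < f i)) := by
  intro xs h
  induction xs with
  | nil => simp
  | cons a t ih =>
    rcases List.pairwise_cons.mp h with ⟨ha, ht⟩
    by_cases hv : f a ≤ v
    · rw [List.dropWhile_cons]
      simp only [hv, decide_true, if_true, List.filter_cons]
      rw [ih ht]
      simp [not_lt.mpr hv]
    · push_neg at hv
      rw [List.dropWhile_cons]
      have hts : t.filter (fun i => decide (v < f i)) = t :=
        List.filter_eq_self.mpr (fun x hx => by simpa using lt_trans hv (ha x hx))
      simp [List.filter_cons, hv, not_le.mpr hv, hts]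

lemma pvQ_maintain (f : Nat → Int) (l r : Nat) (h : l ≤ r) :
    (r :: (pvQ f l r).dropWhile (fun i => decide (f i ≤ f r))) = pvQ f l (r+1) := by
  unfold pvQ
  rw [pvDropWhile_eq_filter f (f r) _ (by
    rw [List.pairwise_reverse]; exact pvFilter_pairwise f l r)]
  rw [List.filter_reverse, List.filter_filter]
  have hsplit : List.range' l (r + 1 - l) = List.range' l (r - l) ++ [r] := by
    have h1 : r + 1 - l = (r - l) + 1 := by omega
    rw [h1, List.range'_1_concat]
    have : l + (r - l) = r := by omega
    rw [this]
  rw [hsplit, List.filter_append]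
  have hfr : List.filter (pvKeep f (r+1)) [r] = [r] := by
    simp [List.filter_cons, pvKeep_self f r (by omega)]
  rw [hfr]
  have hcong : List.filter (pvKeep f (r+1)) (List.range' l (r - l))
      = List.filter (fun a => decide (f r < f a) && pvKeep f r a) (List.range' l (r - l)) := by
    apply List.filter_congr
    intro x hx
    have hxr : x < r := by have := List.mem_range'_1.mp hx; omega
    by_cases h1 : pvKeep f (r+1) x = true
    · have h2 := (pvKeep_iff f (r+1) x).mp h1
      have h3 : pvKeep f r x = true := (pvKeep_iff f r x).mpr (fun j a b => h2 j a (by omega))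
      have h4 : f r < f x := h2 r hxr (by omega)
      simp [h1, h3, h4]
    · have h2 : ¬ ∀ j, x < j → j < r + 1 → f j < f x := fun hc => h1 ((pvKeep_iff f (r+1) x).mpr hc)
      push_neg at h2
      obtain ⟨j, hj1, hj2, hj3⟩ := h2
      rw [Bool.eq_false_iff.mpr h1, eq_comm, Bool.and_eq_false_iff]
      by_cases hjr : j = r
      · left; subst hjr; simpa using hj3
      · right
        rw [Bool.eq_false_iff]
        intro hk
        exact absurd ((pvKeep_iff f r x).mp hk j hj1 (by omega)) (by simpa using hj3)
  rw [hcong, List.reverse_append]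
  rfl

lemma pvQ_getLast? (f : Nat → Int) (l c : Nat) :
    (pvQ f l c).getLast? = ((List.range' l (c - l)).filter (pvKeep f c)).head? := by
  unfold pvQ; rw [List.getLast?_reverse]

lemma pvQ_nonempty (f : Nat → Int) (l c : Nat) (h : l < c) :
    ∃ h0, (pvQ f l c).getLast? = some h0 := by
  rw [pvQ_getLast?]
  have hm : c - 1 ∈ (List.range' l (c - l)).filter (pvKeep f c) := by
    rw [List.mem_filter]
    constructor
    · rw [List.mem_range'_1]; omega
    · rw [pvKeep_iff]; intro j h1 h2; omega
  cases hF : ((List.range' l (c - l)).filter (pvKeep f c)).head? with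
  | none =>
    rw [List.head?_eq_none_iff] at hF
    rw [hF] at hm; cases hm
  | some h0 => exact ⟨h0, rfl⟩

lemma pvQ_front_spec (f : Nat → Int) (l c : Nat) (h0 : Nat)
    (hh : (pvQ f l c).getLast? = some h0) :
    l ≤ h0 ∧ h0 < c ∧ ∀ x, l ≤ x → x < c → f x ≤ f h0 := by
  rw [pvQ_getLast?] at hh
  have hmem : h0 ∈ (List.range' l (c - l)).filter (pvKeep f c) := List.mem_of_mem_head? hh
  have hb := List.mem_range'_1.mp (List.mem_filter.mp hmem).1
  have hk := (pvKeep_iff f c h0).mp (List.mem_filter.mp hmem).2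
  refine ⟨by omega, by omega, ?_⟩
  -- minimality of the head among kept indices
  have hmin : ∀ x, l ≤ x → x < c → pvKeep f c x = true → h0 ≤ x := by
    intro x hx1 hx2 hkx
    obtain ⟨t, hT⟩ := List.head?_eq_some_iff.mp hh
    have hxm : x ∈ h0 :: t := by
      rw [← hT, List.mem_filter]
      exact ⟨List.mem_range'_1.mpr ⟨hx1, by omega⟩, hkx⟩
    rcases List.mem_cons.mp hxm with heq | hxt
    · omega
    · have hpw : ((List.range' l (c - l)).filter (pvKeep f c)).Pairwise (· < ·) := by
        have hr : (List.range' l (c - l)).Pairwise (· < ·) := by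
          rw [List.range'_eq_map_range]
          exact List.pairwise_lt_range.map _ (by omega)
        exact hr.filter _
      rw [hT, List.pairwise_cons] at hpw
      exact le_of_lt (hpw.1 x hxt)
  have key : ∀ d x, c - x ≤ d → l ≤ x → x < c → f x ≤ f h0 := by
    intro d
    induction d with
    | zero => intro x h1 h2 h3; omega
    | succ d ih =>
      intro x h1 h2 h3
      by_cases hx : h0 ≤ x
      · rcases eq_or_lt_of_le hx with heq | hlt
        · rw [← heq]
        · exact le_of_lt (hk x hlt h3)
      · push_neg at hx
        have hnk : ¬ pvKeep f c x = true := fun hc => absurd (hmin x h2 h3 hc) (by omega)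
        have h2' : ¬ ∀ j, x < j → j < c → f j < f x := fun hc => hnk ((pvKeep_iff f c x).mpr hc)
        push_neg at h2'
        obtain ⟨j, hj1, hj2, hj3⟩ := h2'
        exact le_trans (not_lt.mp (by simpa using hj3)) (ih j (by omega) (by omega) hj2)
  intro x hx1 hx2
  exact key (c - x) x le_rfl hx1 hx2

lemma pvQ_pop (f : Nat → Int) (l c : Nat) (h0 : Nat) (hlt : l < c)
    (hh : (pvQ f l c).getLast? = some h0) :
    (if h0 = l then (pvQ f l c).dropLast else pvQ f l c) = pvQ f (l+1) c := by
  rw [pvQ_getLast?] at hh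
  have hsplit : List.range' l (c - l) = l :: List.range' (l+1) (c - (l+1)) := by
    have h1 : c - l = (c - (l+1)) + 1 := by omega
    rw [h1, List.range'_succ]
  unfold pvQ
  rw [hsplit] at hh ⊢
  rw [List.filter_cons] at hh ⊢
  by_cases hkl : pvKeep f c l = true
  · simp only [hkl, if_true] at hh ⊢
    have : h0 = l := by
      rw [List.head?_cons] at hh; injection hh; omega
    rw [if_pos this, List.reverse_cons, List.dropLast_concat]
  · simp only [hkl, if_false, Bool.false_eq_true] at hh ⊢
    have hne : h0 ≠ l := by
      have hmem : h0 ∈ (List.range' (l+1) (c - (l+1))).filter (pvKeep f c) := List.mem_of_mem_head? hh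
      have := List.mem_range'_1.mp (List.mem_filter.mp hmem).1
      omega
    rw [if_neg hne]

-- ---- validity of a window ----

lemma pvValid_mono {nums : List Int} {k : Int} {l l' c : Nat}
    (h : pvValid nums k l c) (hl : l ≤ l') : pvValid nums k l' c :=
  fun i j h1 h2 h3 h4 => h i j (le_trans hl h1) h2 (le_trans hl h3) h4

lemma pvValid_shrink {nums : List Int} {k : Int} {l c : Nat}
    (h : pvValid nums k l (c+1)) : pvValid nums k l c :=
  fun i j h1 h2 h3 h4 => h i j h1 (by omega) h3 (by omega)

lemma pvCond_iff_not_valid (nums : List Int) (k : Int) (l c : Nat) (h1 h2 : Nat)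
    (hlt : l < c)
    (hmx : (pvQ (pvG nums) l c).getLast? = some h1)
    (hmn : (pvQ (fun i => -(pvG nums i)) l c).getLast? = some h2) :
    (nums.getD h1 0 - nums.getD h2 0 > k) ↔ ¬ pvValid nums k l c := by
  obtain ⟨hb1, hb1', hub⟩ := pvQ_front_spec (pvG nums) l c h1 hmx
  obtain ⟨hb2, hb2', hlb⟩ := pvQ_front_spec (fun i => -(pvG nums i)) l c h2 hmn
  constructor
  · intro hgt hv
    have := hv h1 h2 hb1 hb1' hb2 hb2'
    simp only [pvG] at this
    omega
  · intro hv
    by_contra hng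
    push_neg at hng
    apply hv
    intro i j hi1 hi2 hj1 hj2
    have hu := hub i hi1 hi2
    have hl' := hlb j hj1 hj2
    simp only [neg_le_neg_iff] at hl'
    show pvG nums i - pvG nums j ≤ k
    have : nums.getD h1 0 - nums.getD h2 0 ≤ k := hng
    simp only [pvG] at *
    omega

-- ---- the adjust loop ----

lemma pvAdjust_cons (nums : List Int) (k : Int) (fuel : Nat) (maxq minq : List Nat)
    (l mx mn : Nat) (h1 : maxq.getLast? = some mx) (h2 : minq.getLast? = some mn) :
    pvAdjust nums k (fuel+1) maxq minq l
      = if nums.getD mx 0 - nums.getD mn 0 > k then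
          pvAdjust nums k fuel (if mx = l then maxq.dropLast else maxq)
            (if mn = l then minq.dropLast else minq) (l+1)
        else (maxq, minq, l) := by
  rw [pvAdjust, h1, h2]

lemma pvAdjust_spec (nums : List Int) (k : Int) (c : Nat) :
    ∀ fuel l, l ≤ c → c + 1 ≤ fuel + l →
    ∃ l', l ≤ l' ∧ l' ≤ c ∧ pvValid nums k l' c ∧
      (∀ t, l ≤ t → t < l' → ¬ pvValid nums k t c) ∧
      pvAdjust nums k fuel (pvQ (pvG nums) l c) (pvQ (fun i => -(pvG nums i)) l c) l
        = (pvQ (pvG nums) l' c, pvQ (fun i => -(pvG nums i)) l' c, l') := by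
  intro fuel
  induction fuel with
  | zero => intro l h1 h2; omega
  | succ fuel ih =>
    intro l h1 h2
    rcases eq_or_lt_of_le h1 with heq | hlt
    · -- l = c : both queues empty, loop exits at once
      subst heq
      refine ⟨l, le_rfl, le_rfl, ?_, by omega, ?_⟩
      · intro i j a b; omega
      · show pvAdjust nums k (fuel+1) (pvQ (pvG nums) l l) _ l = _
        have hq : pvQ (pvG nums) l l = [] := by unfold pvQ; simp
        have hq' : pvQ (fun i => -(pvG nums i)) l l = [] := by unfold pvQ; simp
        rw [hq, hq']
        simp [pvAdjust]
    · obtain ⟨x1, hx1⟩ := pvQ_nonempty (pvG nums) l c hlt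
      obtain ⟨x2, hx2⟩ := pvQ_nonempty (fun i => -(pvG nums i)) l c hlt
      rw [show fuel + 1 = fuel + 1 from rfl]
      by_cases hcond : nums.getD x1 0 - nums.getD x2 0 > k
      · -- shrink the window once and recurse
        have hstep : pvAdjust nums k (fuel+1) (pvQ (pvG nums) l c) (pvQ (fun i => -(pvG nums i)) l c) l
            = pvAdjust nums k fuel (pvQ (pvG nums) (l+1) c) (pvQ (fun i => -(pvG nums i)) (l+1) c) (l+1) := by
          rw [pvAdjust_cons nums k fuel _ _ l x1 x2 hx1 hx2, if_pos hcond]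
          rw [pvQ_pop (pvG nums) l c x1 hlt hx1, pvQ_pop (fun i => -(pvG nums i)) l c x2 hlt hx2]
        obtain ⟨l', a1, a2, a3, a4, a5⟩ := ih (l+1) (by omega) (by omega)
        refine ⟨l', by omega, a2, a3, ?_, by rw [hstep]; exact a5⟩
        intro t ht1 ht2
        rcases eq_or_lt_of_le ht1 with heq | htl
        · subst heq
          exact ((pvCond_iff_not_valid nums k l c x1 x2 hlt hx1 hx2).mp hcond)
        · exact a4 t (by omega) ht2
      · -- window already valid: loop exits
        refine ⟨l, le_rfl, by omega, ?_, by omega, ?_⟩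
        · by_contra hv
          exact hcond ((pvCond_iff_not_valid nums k l c x1 x2 hlt hx1 hx2).mpr hv)
        · rw [pvAdjust_cons nums k fuel _ _ l x1 x2 hx1 hx2, if_neg hcond]

-- ---- pvBuild bookkeeping ----

lemma pvBuild_length (nums : List Int) (k : Int) (r : Nat) :
    (pvBuild nums k r).length = r + 1 := by
  induction r with
  | zero => rfl
  | succ r ih => simp [pvBuild, ih]

lemma pvBuild_getD (nums : List Int) (k : Int) (r i : Nat) (h : i ≤ r) :
    (pvBuild nums k r).getD i 0 = pvD nums k i := by
  induction r with
  | zero =>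
    have : i = 0 := by omega
    subst this; rfl
  | succ r ih =>
    rcases eq_or_lt_of_le h with rfl | hlt
    · rfl
    · show (pvBuild nums k (r+1)).getD i 0 = _
      rw [pvBuild]
      rw [List.getD_append _ _ _ _ (by rw [pvBuild_length]; omega)]
      exact ih (by omega)

-- ---- running max / min over a window ----

lemma pvWM_base (nums : List Int) (l c : Nat) (h : c ≤ l + 1) :
    pvWM nums l c = pvG nums l := by
  unfold pvWM
  have : c - (l+1) = 0 := by omega
  rw [this]; rfl

lemma pvWm_base (nums : List Int) (l c : Nat) (h : c ≤ l + 1) :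
    pvWm nums l c = pvG nums l := by
  unfold pvWm
  have : c - (l+1) = 0 := by omega
  rw [this]; rfl

lemma pvWM_succ (nums : List Int) (l c : Nat) (h : l ≤ c) :
    pvWM nums l (c+1) = max (pvWM nums l c) (pvG nums c) := by
  rcases eq_or_lt_of_le h with rfl | hlt
  · rw [pvWM_base nums l (l+1) (by omega), pvWM_base nums l l (by omega)]
    simp
  · unfold pvWM
    have h1 : c + 1 - (l+1) = (c - (l+1)) + 1 := by omega
    rw [h1, List.range'_1_concat]
    have h2 : l + 1 + (c - (l+1)) = c := by omega
    rw [h2, List.map_append, List.foldl_append]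
    rfl

lemma pvWm_succ (nums : List Int) (l c : Nat) (h : l ≤ c) :
    pvWm nums l (c+1) = min (pvWm nums l c) (pvG nums c) := by
  rcases eq_or_lt_of_le h with rfl | hlt
  · rw [pvWm_base nums l (l+1) (by omega), pvWm_base nums l l (by omega)]
    simp
  · unfold pvWm
    have h1 : c + 1 - (l+1) = (c - (l+1)) + 1 := by omega
    rw [h1, List.range'_1_concat]
    have h2 : l + 1 + (c - (l+1)) = c := by omega
    rw [h2, List.map_append, List.foldl_append]
    rfl

lemma pvWM_bound (nums : List Int) (l c x : Nat) (h1 : l ≤ x) (h2 : x < c) :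
    pvG nums x ≤ pvWM nums l c := by
  unfold pvWM
  rcases eq_or_lt_of_le h1 with rfl | hlt
  · exact (PySem.List.le_foldl_max _ _).1
  · exact (PySem.List.le_foldl_max _ _).2 _ (List.mem_map.mpr ⟨x, List.mem_range'_1.mpr ⟨by omega, by omega⟩, rfl⟩)

lemma pvWm_bound (nums : List Int) (l c x : Nat) (h1 : l ≤ x) (h2 : x < c) :
    pvWm nums l c ≤ pvG nums x := by
  unfold pvWm
  rcases eq_or_lt_of_le h1 with rfl | hlt
  · exact (PySem.List.foldl_min_le _ _).1
  · exact (PySem.List.foldl_min_le _ _).2 _ (List.mem_map.mpr ⟨x, List.mem_range'_1.mpr ⟨by omega, by omega⟩, rfl⟩)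

lemma pvWM_mem (nums : List Int) (l c : Nat) :
    ∃ x, l ≤ x ∧ x < max c (l+1) ∧ pvWM nums l c = pvG nums x := by
  unfold pvWM
  rcases PySem.List.foldl_max_mem ((List.range' (l+1) (c - (l+1))).map (pvG nums)) (pvG nums l) with h | h
  · exact ⟨l, le_rfl, by omega, h⟩
  · obtain ⟨x, hx, hgx⟩ := List.mem_map.mp h
    have := List.mem_range'_1.mp hx
    exact ⟨x, by omega, by omega, hgx.symm⟩

lemma pvWm_mem (nums : List Int) (l c : Nat) :
    ∃ x, l ≤ x ∧ x < max c (l+1) ∧ pvWm nums l c = pvG nums x := by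
  unfold pvWm
  rcases PySem.List.foldl_min_mem ((List.range' (l+1) (c - (l+1))).map (pvG nums)) (pvG nums l) with h | h
  · exact ⟨l, le_rfl, by omega, h⟩
  · obtain ⟨x, hx, hgx⟩ := List.mem_map.mp h
    have := List.mem_range'_1.mp hx
    exact ⟨x, by omega, by omega, hgx.symm⟩

lemma pvValid_iff_W (nums : List Int) (k : Int) (l c : Nat) (h : l < c) :
    pvValid nums k l c ↔ pvWM nums l c - pvWm nums l c ≤ k := by
  constructor
  · intro hv
    obtain ⟨x1, a1, a2, a3⟩ := pvWM_mem nums l c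
    obtain ⟨x2, b1, b2, b3⟩ := pvWm_mem nums l c
    rw [a3, b3]
    exact hv x1 x2 a1 (by omega) b1 (by omega)
  · intro hw i j h1 h2 h3 h4
    have hu := pvWM_bound nums l c i h1 h2
    have hl' := pvWm_bound nums l c j h3 h4
    omega

-- ---- Source B's inner loop computes the guarded dp-sum ----

lemma pvInnerGo_eq (nums : List Int) (k : Int) (dp : List Int) :
    ∀ cnt mx mn tot, pvInnerGo nums k dp cnt mx mn tot
      = tot + ((List.range cnt).map (fun l =>
          if max mx (pvWM nums l cnt) - min mn (pvWm nums l cnt) ≤ k then dp.getD l 0 else 0)).sum := by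
  intro cnt
  induction cnt with
  | zero => intro mx mn tot; simp [pvInnerGo]
  | succ cnt ih =>
    intro mx mn tot
    rw [pvInnerGo, ih]
    have hlast : ((List.range (cnt+1)).map (fun l =>
        if max mx (pvWM nums l (cnt+1)) - min mn (pvWm nums l (cnt+1)) ≤ k then dp.getD l 0 else 0))
      = (List.range cnt).map (fun l =>
          if max (max mx (nums.getD cnt 0)) (pvWM nums l cnt)
              - min (min mn (nums.getD cnt 0)) (pvWm nums l cnt) ≤ k then dp.getD l 0 else 0)
        ++ [if max mx (nums.getD cnt 0) - min mn (nums.getD cnt 0) ≤ k then dp.getD cnt 0 else 0] := by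
      rw [List.range_succ, List.map_append]
      congr 1
      · apply List.map_congr_left
        intro l hl
        have hlc : l < cnt := List.mem_range.mp hl
        rw [pvWM_succ nums l cnt (by omega), pvWm_succ nums l cnt (by omega)]
        have e1 : max mx (max (pvWM nums l cnt) (pvG nums cnt))
            = max (max mx (nums.getD cnt 0)) (pvWM nums l cnt) := by
          simp only [pvG]
          rw [max_left_comm, max_comm]
        have e2 : min mn (min (pvWm nums l cnt) (pvG nums cnt))
            = min (min mn (nums.getD cnt 0)) (pvWm nums l cnt) := by
          simp only [pvG]
          rw [min_left_comm, min_comm]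
        rw [e1, e2]
      · simp only [List.map_cons, List.map_nil]
        rw [pvWM_base nums cnt (cnt+1) (by omega), pvWm_base nums cnt (cnt+1) (by omega)]
        simp [pvG]
    rw [hlast, List.sum_append]
    simp only [List.sum_cons, List.sum_nil, add_zero]
    split_ifs <;> ring

-- ---- pvD recurrence as a guarded sum ----

lemma pvD_succ_sum (nums : List Int) (k : Int) (r : Nat) :
    pvD nums k (r+1) = PySem.Int.mod
      (((List.range (r+1)).map (fun l =>
          if pvWM nums l (r+1) - pvWm nums l (r+1) ≤ k then pvD nums k l else 0)).sum) (10^9+7) := by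
  have hlen := pvBuild_length nums k r
  have hget : pvD nums k (r+1) = PySem.Int.mod
      (pvInnerGo nums k (pvBuild nums k r) (r+1) (nums.getD r 0) (nums.getD r 0) 0) (10^9+7) := by
    unfold pvD
    rw [pvBuild]
    have : r + 1 = (pvBuild nums k r).length := by omega
    rw [this]
    simp [List.getD_eq_getElem?_getD]
  rw [hget, pvInnerGo_eq]
  congr 1
  rw [zero_add]
  congr 1
  apply List.map_congr_left
  intro l hl
  have hlr : l < r + 1 := List.mem_range.mp hl
  have e1 : max (nums.getD r 0) (pvWM nums l (r+1)) = pvWM nums l (r+1) :=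
    max_eq_right (pvWM_bound nums l (r+1) r (by omega) (by omega))
  have e2 : min (nums.getD r 0) (pvWm nums l (r+1)) = pvWm nums l (r+1) :=
    min_eq_right (pvWm_bound nums l (r+1) r (by omega) (by omega))
  rw [e1, e2, pvBuild_getD nums k r l (by omega)]

-- ---- prefix sums mod M ----

lemma pvS_mod (nums : List Int) (k : Int) (i : Nat) :
    pvS nums k i = PySem.Int.mod (((List.range (i+1)).map (pvD nums k)).sum) (10^9+7) := by
  have hM : (0:Int) < 10^9+7 := by norm_num
  induction i with
  | zero =>
    show (1:Int) = _
    norm_num [pvD, pvBuild, PySem.Int.mod_eq_emod_of_pos hM]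
  | succ i ih =>
    rw [pvS, ih]
    conv_rhs => rw [List.range_succ, List.map_append, List.sum_append]
    simp only [List.map_cons, List.map_nil, List.sum_cons, List.sum_nil, add_zero,
      PySem.Int.mod_eq_emod_of_pos hM]
    conv_lhs => rw [Int.add_emod]
    conv_rhs => rw [Int.add_emod]
    rw [Int.emod_emod_of_dvd _ dvd_rfl]

-- ---- the dp update formula agrees with pvD ----

lemma pvD_formula (nums : List Int) (k : Int) (r l' : Nat)
    (h1 : l' ≤ r + 1) (h2 : pvValid nums k l' (r+1))
    (h3 : ∀ t, t < l' → ¬ pvValid nums k t (r+1)) :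
    (if l' > 0 then PySem.Int.mod (pvS nums k r - pvS nums k (l'-1) + (10^9+7)) (10^9+7)
      else PySem.Int.mod (pvS nums k r) (10^9+7)) = pvD nums k (r+1) := by
  have hM : (0:Int) < 10^9+7 := by norm_num
  have hr : List.range (r+1) = List.range' 0 l' ++ List.range' l' (r+1-l') := by
    have hn : r + 1 = l' + (r+1-l') := by omega
    rw [List.range_eq_range', hn, ← List.range'_append_1 (s := 0) (m := l') (n := r+1-l')]
    norm_num
  have hsum : ((List.range (r+1)).map (fun l =>
      if pvWM nums l (r+1) - pvWm nums l (r+1) ≤ k then pvD nums k l else 0)).sum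
      = ((List.range' l' (r+1-l')).map (pvD nums k)).sum := by
    rw [hr, List.map_append, List.sum_append]
    have h0 : (((List.range' 0 l').map (fun l =>
        if pvWM nums l (r+1) - pvWm nums l (r+1) ≤ k then pvD nums k l else 0))).sum = 0 := by
      apply List.sum_eq_zero
      intro x hx
      obtain ⟨t, ht, rfl⟩ := List.mem_map.mp hx
      have htb := List.mem_range'_1.mp ht
      rw [if_neg]
      intro hc
      exact h3 t (by omega) ((pvValid_iff_W nums k t (r+1) (by omega)).mpr hc)
    rw [h0, zero_add]
    congr 1
    apply List.map_congr_left
    intro x hx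
    have hxb := List.mem_range'_1.mp hx
    rw [if_pos]
    exact (pvValid_iff_W nums k x (r+1) (by omega)).mp (pvValid_mono h2 (by omega))
  have key : ∀ a b M : Int, 0 < M → ((a + b) % M - a % M + M) % M = b % M := by
    intro a b M hM'
    have h1 : Int.ModEq M ((a+b) % M) (a+b) := Int.emod_emod_of_dvd _ dvd_rfl
    have h2' : Int.ModEq M (a % M) a := Int.emod_emod_of_dvd _ dvd_rfl
    have h3' : Int.ModEq M M 0 := by unfold Int.ModEq; simp
    have h4 := (h1.sub h2').add h3'
    calc ((a+b) % M - a % M + M) % M = (a + b - a + 0) % M := h4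
      _ = b % M := by ring_nf
  rw [pvD_succ_sum, hsum]
  by_cases hl0 : l' > 0
  · rw [if_pos hl0]
    rw [pvS_mod, pvS_mod]
    simp only [PySem.Int.mod_eq_emod_of_pos hM]
    have hl'1 : l' - 1 + 1 = l' := by omega
    rw [hl'1]
    have hB : ((List.range (r+1)).map (pvD nums k)).sum
        = ((List.range l').map (pvD nums k)).sum + ((List.range' l' (r+1-l')).map (pvD nums k)).sum := by
      rw [hr]
      rw [List.map_append, List.sum_append, List.range_eq_range']
    rw [hB]
    exact key _ _ _ hM
  · rw [if_neg hl0]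
    have hl'0 : l' = 0 := by omega
    subst hl'0
    rw [pvS_mod]
    simp only [PySem.Int.mod_eq_emod_of_pos hM]
    rw [Int.emod_emod_of_dvd _ dvd_rfl]
    congr 2
    rw [List.range_eq_range']
    norm_num

-- ---- the list-update bookkeeping ----

lemma pvGetD_set_ne (xs : List Int) (i j : Nat) (v : Int) (h : j ≠ i) :
    (xs.set j v).getD i 0 = xs.getD i 0 := by
  rw [List.getD_eq_getElem?_getD, List.getD_eq_getElem?_getD, List.getElem?_set_ne h]

lemma pvGetD_set_self (xs : List Int) (j : Nat) (v : Int) (h : j < xs.length) :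
    (xs.set j v).getD j 0 = v := by
  rw [List.getD_eq_getElem?_getD, List.getElem?_set_self h]
  rfl

-- ---- the main invariant of A's loop ----

def pvInvA (nums : List Int) (k : Int) (n r : Nat)
    (st : List Int × List Int × List Nat × List Nat × Nat) : Prop :=
  st.1.length = n+1 ∧ st.2.1.length = n+1 ∧
  (∀ i, i ≤ r → st.1.getD i 0 = pvD nums k i) ∧
  (∀ i, i ≤ r → st.2.1.getD i 0 = pvS nums k i) ∧
  st.2.2.2.2 ≤ r ∧
  st.2.2.1 = pvQ (fun i => -(pvG nums i)) st.2.2.2.2 r ∧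
  st.2.2.2.1 = pvQ (pvG nums) st.2.2.2.2 r ∧
  pvValid nums k st.2.2.2.2 r ∧
  (∀ t, t < st.2.2.2.2 → ¬ pvValid nums k t r)

lemma pvStepA_inv (nums : List Int) (k : Int) (n r : Nat) (hrn : r < n)
    (st : List Int × List Int × List Nat × List Nat × Nat)
    (hinv : pvInvA nums k n r st) :
    pvInvA nums k n (r+1) (pvStepA nums k n st r) := by
  obtain ⟨dp, px, minq, maxq, l⟩ := st
  obtain ⟨hdplen, hpxlen, hdp, hpx, hl, hminq, hmaxq, hval, hbelow⟩ := hinv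
  simp only at hdplen hpxlen hdp hpx hl hminq hmaxq hval hbelow
  subst hminq hmaxq
  have hpred : (fun i => decide (nums.getD i 0 ≥ nums.getD r 0))
      = (fun i => decide ((fun j => -(pvG nums j)) i ≤ (fun j => -(pvG nums j)) r)) := by
    funext i
    rw [decide_eq_decide]
    simp only [pvG, ge_iff_le]
    omega
  have hpred2 : (fun i => decide (nums.getD i 0 ≤ nums.getD r 0))
      = (fun i => decide (pvG nums i ≤ pvG nums r)) := rfl
  obtain ⟨l', b1, b2, b3, b4, b5⟩ := pvAdjust_spec nums k (r+1) (n+1) l (by omega) (by omega)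
  have hb : ∀ t, t < l' → ¬ pvValid nums k t (r+1) := by
    intro t ht
    by_cases htl : t < l
    · exact fun hv => hbelow t htl (pvValid_shrink hv)
    · exact b4 t (by omega) ht
  simp only [pvStepA]
  rw [hpred, hpred2, pvQ_maintain (pvG nums) l r hl, pvQ_maintain (fun j => -(pvG nums j)) l r hl]
  rw [b5]
  have hdpv : (if l' > 0 then PySem.Int.mod (px.getD r 0 - px.getD (l'-1) 0 + (10^9+7)) (10^9+7)
      else PySem.Int.mod (px.getD r 0) (10^9+7)) = pvD nums k (r+1) := by
    rw [hpx r le_rfl]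
    by_cases hl0 : l' > 0
    · rw [if_pos hl0, hpx (l'-1) (by omega)]
      have hfor := pvD_formula nums k r l' b2 b3 hb
      rw [if_pos hl0] at hfor
      exact hfor
    · rw [if_neg hl0]
      have hfor := pvD_formula nums k r l' b2 b3 hb
      rw [if_neg hl0] at hfor
      exact hfor
  unfold pvInvA
  refine ⟨?_, ?_, ?_, ?_, by simpa using b2, rfl, rfl, b3, hb⟩
  · simpa using hdplen
  · simpa using hpxlen
  · intro i hi
    rcases eq_or_lt_of_le hi with heq | hlt
    · subst heq
      show (dp.set (r+1) _).getD (r+1) 0 = _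
      rw [pvGetD_set_self _ _ _ (by omega)]
      exact hdpv
    · show (dp.set (r+1) _).getD i 0 = _
      rw [pvGetD_set_ne _ _ _ _ (by omega)]
      exact hdp i (by omega)
  · intro i hi
    rcases eq_or_lt_of_le hi with heq | hlt
    · subst heq
      show (px.set (r+1) _).getD (r+1) 0 = _
      rw [pvGetD_set_self _ _ _ (by omega)]
      rw [hdpv, hpx r le_rfl]
      rfl
    · show (px.set (r+1) _).getD i 0 = _
      rw [pvGetD_set_ne _ _ _ _ (by omega)]
      exact hpx i (by omega)

lemma pvFold_inv (nums : List Int) (k : Int) (n : Nat) (hn : n = nums.length) :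
    ∀ r, r ≤ n → pvInvA nums k n r (List.foldl (pvStepA nums k n)
      ((List.replicate (n+1) (0:Int)).set 0 1, (List.replicate (n+1) (0:Int)).set 0 1,
        ([] : List Nat), ([] : List Nat), 0) (List.range r)) := by
  intro r
  induction r with
  | zero =>
    intro _
    simp only [List.range_zero, List.foldl_nil]
    refine ⟨by simp, by simp, ?_, ?_, le_rfl, ?_, ?_, ?_, fun t ht => absurd ht (Nat.not_lt_zero t)⟩
    · intro i hi
      have : i = 0 := by omega
      subst this
      show ((List.replicate (n+1) (0:Int)).set 0 1).getD 0 0 = pvD nums k 0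
      rw [pvGetD_set_self _ 0 1 (by simp)]
      rfl
    · intro i hi
      have : i = 0 := by omega
      subst this
      show ((List.replicate (n+1) (0:Int)).set 0 1).getD 0 0 = pvS nums k 0
      rw [pvGetD_set_self _ 0 1 (by simp)]
      rfl
    · show ([] : List Nat) = pvQ (fun i => -(pvG nums i)) 0 0
      unfold pvQ; simp
    · show ([] : List Nat) = pvQ (pvG nums) 0 0
      unfold pvQ; simp
    · intro i j a b; omega

  | succ r ih =>
    intro hr
    rw [List.range_succ, List.foldl_append, List.foldl_cons, List.foldl_nil]
    exact pvStepA_inv nums k n r (by omega) _ (ih (by omega))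

-- ===== VERDICT (by name: the statement is the Claim_ definition above) =====
theorem countPartitions2_spec : Claim_equal_countPartitions2 := by
  intro nums k _
  show countPartitions2 nums k = countPartitions2_alt nums k
  unfold countPartitions2 countPartitions2_alt
  have hinv := pvFold_inv nums k nums.length rfl nums.length le_rfl
  obtain ⟨_, _, hdp, _⟩ := hinv
  rw [hdp nums.length le_rfl]
  unfold pvD
  rfl
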